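-- pv_equiv track=rewrite | github.com/DevarajAutomation/Python_Basic_Programming | Interview/minimum-element-in-sorted-array.py | minimum_element_in_sorted_array
-- ===== SOURCE A (Python) =====
-- def minimum_element_in_sorted_array(arr):
--     n=len(arr)
--     count=0
--
--     for i in range(n):
--         for j in range(n-1):
--             if arr[j] > arr[j+1]:
--                 arr[j],arr[j+1]=arr[j+1],arr[j]
--                 count +=1
--
--     return arr[1]
-- ===== SOURCE B (Python) =====
-- def minimum_element_in_sorted_array(arr):
--     # One pass tracking the two smallest values (with multiplicity);
--     # returns the second one, i.e. what sorting and taking arr[1] gives.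
--     # Unlike A, does not mutate arr (return-value equivalence only).
--     m1 = None
--     m2 = None
--     for x in arr:
--         if m1 is None or x < m1:
--             m2 = m1
--             m1 = x
--         elif m2 is None or x < m2:
--             m2 = x
--     return m2
-- ===== Notes on version B (the rewrite author's own statement) =====
-- stated objective: faster
-- what changed: Replaces the full O(n^2) bubble sort with a single pass that tracks the two smallest elements (with multiplicity) and returns the second.
-- outside the precondition, e.g. on minimum_element_in_sorted_array([1]): A raises IndexError, B returns None
import Mathlib
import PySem

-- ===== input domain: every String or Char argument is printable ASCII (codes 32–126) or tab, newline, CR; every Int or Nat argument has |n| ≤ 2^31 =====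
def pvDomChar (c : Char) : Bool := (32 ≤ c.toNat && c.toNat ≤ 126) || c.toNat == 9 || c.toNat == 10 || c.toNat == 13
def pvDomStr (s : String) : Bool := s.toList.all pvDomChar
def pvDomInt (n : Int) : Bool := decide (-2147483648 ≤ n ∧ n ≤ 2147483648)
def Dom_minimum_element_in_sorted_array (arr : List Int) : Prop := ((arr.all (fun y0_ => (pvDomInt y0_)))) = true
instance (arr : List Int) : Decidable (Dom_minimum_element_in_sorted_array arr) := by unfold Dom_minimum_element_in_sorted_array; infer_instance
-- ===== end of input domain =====

-- B replaces A's O(n^2) bubble sort by one pass tracking the two smallest values and returning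
-- the second. A sorts its argument in place (a caller-visible mutation B does not perform);
-- the equivalence proved here is about the return value only.

-- ===== PORT A =====
-- one step of the inner loop: compare positions j and j+1, swap if out of order
def pvInnerStep (l : List Int) (j : Nat) : List Int :=
  match l[j]?, l[j+1]? with
  | some a, some b => if a > b then (l.set j b).set (j+1) a else l
  | _, _ => l

def minimum_element_in_sorted_array (arr : List Int) : Int :=
  let n := arr.length
  let final := (List.range n).foldl
    (fun l _ => (List.range (n-1)).foldl (fun l' j => pvInnerStep l' j) l) arr
  (PySem.List.pyGet? final 1).getD 0   -- arr[1]; none (IndexError) is excluded by Pre_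

-- ===== PORT B =====
def pvAltStep (s : Option Int × Option Int) (x : Int) : Option Int × Option Int :=
  match s with
  | (none, _) => (some x, none)                -- m1 is None (then m2 is None too): m2, m1 = m1, x
  | (some a, m2) =>
    if x < a then (some x, some a)             -- x < m1: m2, m1 = m1, x
    else match m2 with
      | none => (some a, some x)               -- m2 is None: m2 = x
      | some b => if x < b then (some a, some x) else (some a, some b)

def minimum_element_in_sorted_array_alt (arr : List Int) : Int :=
  ((arr.foldl pvAltStep (none, none)).2).getD 0   -- m2; None is excluded by Pre_

-- ===== PRECONDITION & SPEC =====
-- A evaluates arr[1] after sorting, an IndexError when the list has fewer than two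
-- elements; Pre_ excludes exactly those inputs (B's Python returns None there).
def Pre_minimum_element_in_sorted_array (arr : List Int) : Prop := 2 ≤ arr.length
instance (arr : List Int) : Decidable (Pre_minimum_element_in_sorted_array arr) := by
  unfold Pre_minimum_element_in_sorted_array; infer_instance

def pvWitness_minimum_element_in_sorted_array : List Int := [3, 1, 2]

def Spec_minimum_element_in_sorted_array (arr : List Int) (out : Int) : Prop := out = minimum_element_in_sorted_array_alt arr
instance (arr : List Int) (out : Int) : Decidable (Spec_minimum_element_in_sorted_array arr out) := by unfold Spec_minimum_element_in_sorted_array; infer_instance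

-- ===== CLAIM (what is proved, stated in full; the proofs are below) =====
def Claim_equal_minimum_element_in_sorted_array : Prop := ∀ (arr : List Int), Dom_minimum_element_in_sorted_array arr → Pre_minimum_element_in_sorted_array arr → Spec_minimum_element_in_sorted_array arr (minimum_element_in_sorted_array arr)

-- ===== LEMMAS AND PROOFS =====

-- the structural single bubble pass
def pvPass : List Int → List Int
  | [] => []
  | [a] => [a]
  | a :: b :: t => if a > b then b :: pvPass (a :: t) else a :: pvPass (b :: t)

theorem pvPass_length : ∀ l : List Int, (pvPass l).length = l.length := by
  intro l
  induction l using pvPass.induct with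
  | case1 => simp [pvPass]
  | case2 => simp [pvPass]
  | case3 a b t h ih => simp [pvPass, if_pos h, ih]
  | case4 a b t h ih => simp [pvPass, if_neg h, ih]

theorem pvPass_perm : ∀ l : List Int, (pvPass l).Perm l := by
  intro l
  induction l using pvPass.induct with
  | case1 => simp [pvPass]
  | case2 => simp [pvPass]
  | case3 a b t h ih =>
    simp only [pvPass, if_pos h]
    exact (ih.cons b).trans (List.Perm.swap a b t)
  | case4 a b t h ih =>
    simp only [pvPass, if_neg h]
    exact ih.cons a

-- the index-based inner fold equals the structural pass
theorem pvInnerFold_eq : ∀ (s p : List Int),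
    (List.range' p.length (s.length - 1)).foldl (fun l' i => pvInnerStep l' i) (p ++ s)
      = p ++ pvPass s := by
  intro s
  induction s using pvPass.induct with
  | case1 => intro p; simp [pvPass]
  | case2 a => intro p; simp [pvPass]
  | case3 a b t h ih =>
    intro p
    have hlen : (a :: b :: t).length - 1 = t.length + 1 := by simp
    rw [hlen, List.range'_succ, List.foldl_cons]
    have hga : (p ++ a :: b :: t)[p.length]? = some a := by
      rw [List.getElem?_append_right (le_refl _)]; simp
    have hgb : (p ++ a :: b :: t)[p.length + 1]? = some b := by
      rw [List.getElem?_append_right (by omega)]; simp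
    have hstep : pvInnerStep (p ++ a :: b :: t) p.length = (p ++ [b]) ++ a :: t := by
      simp only [pvInnerStep, hga, hgb, if_pos h]
      have h1 : (p ++ a :: b :: t).set p.length b = p ++ b :: b :: t := by
        rw [List.set_append]; simp
      rw [h1, List.set_append]
      simp
    rw [hstep]
    have hl : p.length + 1 = (p ++ [b]).length := by simp
    rw [hl]
    have := ih (p ++ [b])
    simp only [List.length_cons, Nat.add_sub_cancel] at this
    rw [this]
    simp [pvPass, if_pos h]
  | case4 a b t h ih =>
    intro p
    have hlen : (a :: b :: t).length - 1 = t.length + 1 := by simp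
    rw [hlen, List.range'_succ, List.foldl_cons]
    have hga : (p ++ a :: b :: t)[p.length]? = some a := by
      rw [List.getElem?_append_right (le_refl _)]; simp
    have hgb : (p ++ a :: b :: t)[p.length + 1]? = some b := by
      rw [List.getElem?_append_right (by omega)]; simp
    have hstep : pvInnerStep (p ++ a :: b :: t) p.length = (p ++ [a]) ++ b :: t := by
      simp only [pvInnerStep, hga, hgb, if_neg h]
      simp
    rw [hstep]
    have hl : p.length + 1 = (p ++ [a]).length := by simp
    rw [hl]
    have := ih (p ++ [a])
    simp only [List.length_cons, Nat.add_sub_cancel] at this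
    rw [this]
    simp [pvPass, if_neg h]

theorem pvIter_perm : ∀ (m : Nat) (l : List Int), (pvPass^[m] l).Perm l := by
  intro m
  induction m with
  | zero => intro l; simp
  | succ m ih =>
    intro l
    rw [Function.iterate_succ_apply']
    exact (pvPass_perm _).trans (ih l)

theorem pvIter_length (m : Nat) (l : List Int) : (pvPass^[m] l).length = l.length :=
  (pvIter_perm m l).length_eq

theorem pvPass_append_max : ∀ (l : List Int) (m : Int), (∀ x ∈ l, x ≤ m) →
    pvPass (l ++ [m]) = pvPass l ++ [m] := by
  intro l
  induction l using pvPass.induct with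
  | case1 => intro m _; simp [pvPass]
  | case2 a =>
    intro m hm
    have : ¬ a > m := by have := hm a (by simp); omega
    simp [pvPass, this]
  | case3 a b t h ih =>
    intro m hm
    show pvPass (a :: b :: (t ++ [m])) = _
    rw [pvPass, if_pos h]
    rw [show a :: (t ++ [m]) = (a :: t) ++ [m] from rfl]
    rw [ih m (by intro x hx; exact hm x (by simp at hx ⊢; tauto))]
    simp [pvPass, if_pos h]
  | case4 a b t h ih =>
    intro m hm
    show pvPass (a :: b :: (t ++ [m])) = _
    rw [pvPass, if_neg h]
    rw [show b :: (t ++ [m]) = (b :: t) ++ [m] from rfl]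
    rw [ih m (by intro x hx; exact hm x (by simp at hx ⊢; tauto))]
    simp [pvPass, if_neg h]

theorem pvPass_max : ∀ (l : List Int), l ≠ [] →
    ∃ xs M, pvPass l = xs ++ [M] ∧ ∀ x ∈ l, x ≤ M := by
  intro l
  induction l using pvPass.induct with
  | case1 => intro h; exact absurd rfl h
  | case2 a => intro _; exact ⟨[], a, by simp [pvPass], by simp⟩
  | case3 a b t h ih =>
    intro _
    obtain ⟨xs, M, hps, hb⟩ := ih (by simp)
    refine ⟨b :: xs, M, ?_, ?_⟩
    · rw [pvPass, if_pos h, hps]; simp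
    · intro x hx
      have ha : a ≤ M := hb a (by simp)
      simp at hx
      rcases hx with rfl | rfl | hx
      · exact ha
      · omega
      · exact hb x (by simp [hx])
  | case4 a b t h ih =>
    intro _
    obtain ⟨xs, M, hps, hb⟩ := ih (by simp)
    refine ⟨a :: xs, M, ?_, ?_⟩
    · rw [pvPass, if_neg h, hps]; simp
    · intro x hx
      have hbM : b ≤ M := hb b (by simp)
      simp at hx
      rcases hx with rfl | rfl | hx
      · omega
      · exact hbM
      · exact hb x (by simp [hx])

theorem pvIter_append_max : ∀ (m : Nat) (xs : List Int) (M : Int), (∀ x ∈ xs, x ≤ M) →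
    pvPass^[m] (xs ++ [M]) = pvPass^[m] xs ++ [M] := by
  intro m
  induction m with
  | zero => intro xs M _; simp
  | succ m ih =>
    intro xs M hM
    rw [Function.iterate_succ_apply, Function.iterate_succ_apply]
    rw [pvPass_append_max xs M hM]
    exact ih (pvPass xs) M (fun x hx => hM x ((pvPass_perm xs).mem_iff.mp hx))

theorem pvIter_sorted : ∀ (n : Nat) (l : List Int), l.length ≤ n →
    List.Pairwise (· ≤ ·) (pvPass^[n] l) := by
  intro n
  induction n with
  | zero =>
    intro l hl
    have : l = [] := List.eq_nil_of_length_eq_zero (by omega)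
    simp [this]
  | succ n ih =>
    intro l hl
    rcases eq_or_ne l [] with rfl | hne
    · have : ∀ m, pvPass^[m] ([] : List Int) = [] := by
        intro m; induction m with
        | zero => simp
        | succ m ihm => rw [Function.iterate_succ_apply, (by simp [pvPass] : pvPass ([] : List Int) = [])]; exact ihm
      simp [this]
    · obtain ⟨xs, M, hps, hb⟩ := pvPass_max l hne
      rw [Function.iterate_succ_apply, hps]
      have hxsb : ∀ x ∈ xs, x ≤ M := by
        intro x hx
        exact hb x ((pvPass_perm l).mem_iff.mp (by simp [hps, hx]))
      rw [pvIter_append_max n xs M hxsb]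
      have hlen : xs.length ≤ n := by
        have h1 := pvPass_length l
        rw [hps] at h1
        simp at h1
        omega
      rw [List.pairwise_append]
      refine ⟨ih xs hlen, by simp, ?_⟩
      intro x hx y hy
      simp at hy
      subst hy
      exact hxsb x ((pvIter_perm n xs).mem_iff.mp hx)

-- one outer iteration equals one structural pass (on lists of the right length)
theorem pvInner_eq_pass (n : Nat) (l : List Int) (hl : l.length = n) :
    (List.range (n-1)).foldl (fun l' j => pvInnerStep l' j) l = pvPass l := by
  have := pvInnerFold_eq l []
  simpa [List.range_eq_range', hl] using this

-- the whole double loop of A equals n structural passes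
theorem pvOuter_eq_iter (n : Nat) : ∀ (m : Nat) (l : List Int), l.length = n →
    (List.range m).foldl (fun l' _ => (List.range (n-1)).foldl (fun l'' j => pvInnerStep l'' j) l') l
      = pvPass^[m] l := by
  intro m
  induction m with
  | zero => intro l _; simp
  | succ m ih =>
    intro l hl
    rw [List.range_succ, List.foldl_append, ih l hl, List.foldl_cons, List.foldl_nil]
    rw [pvInner_eq_pass n _ (by rw [pvIter_length]; exact hl)]
    rw [Function.iterate_succ_apply']

-- A's double loop produces the sorted permutation of arr, i.e. insertion sort's output
theorem pvBubble_eq_sort (arr : List Int) :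
    (List.range arr.length).foldl
      (fun l _ => (List.range (arr.length-1)).foldl (fun l' j => pvInnerStep l' j) l) arr
      = List.insertionSort (· ≤ ·) arr := by
  rw [pvOuter_eq_iter arr.length arr.length arr rfl]
  exact List.Perm.eq_of_pairwise' (pvIter_sorted arr.length arr le_rfl)
    (List.pairwise_insertionSort _ arr)
    ((pvIter_perm _ _).trans (List.perm_insertionSort _ arr).symm)

-- inserting a new element at the right of the input inserts it into the sorted output
theorem pvSort_append (xs : List Int) (x : Int) :
    List.insertionSort (· ≤ ·) (xs ++ [x])
      = List.orderedInsert (· ≤ ·) x (List.insertionSort (· ≤ ·) xs) := by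
  exact List.Perm.eq_of_pairwise' (List.pairwise_insertionSort _ _)
    (List.Pairwise.orderedInsert x _ (List.pairwise_insertionSort _ xs))
    ((List.perm_insertionSort _ _).trans
      (((List.perm_append_singleton x xs).trans
        ((List.perm_insertionSort (· ≤ ·) xs).cons x).symm).trans
        (List.perm_orderedInsert _ x _).symm))

-- B's fold state is always the first two elements of the sorted prefix
theorem pvAltFold_eq (xs : List Int) :
    xs.foldl pvAltStep (none, none)
      = ((List.insertionSort (· ≤ ·) xs)[0]?, (List.insertionSort (· ≤ ·) xs)[1]?) := by
  induction xs using List.reverseRecOn with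
  | nil => simp [List.insertionSort]
  | append_singleton xs x ih =>
    rw [List.foldl_append, List.foldl_cons, List.foldl_nil, ih, pvSort_append]
    have hs : (List.insertionSort (· ≤ ·) xs).Pairwise (· ≤ ·) := List.pairwise_insertionSort _ xs
    rcases h : List.insertionSort (· ≤ ·) xs with _ | ⟨a, _ | ⟨b, t⟩⟩
    · simp [List.orderedInsert, pvAltStep]
    · simp only [List.orderedInsert, pvAltStep]
      split_ifs <;> simp_all <;> omega
    · have hab : a ≤ b := by
        rw [h] at hs
        exact (List.pairwise_cons.mp hs).1 b (by simp)
      simp only [List.orderedInsert, pvAltStep]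
      split_ifs <;> simp_all
      all_goals (intros; split_ifs <;> simp_all <;> omega)

-- ===== VERDICT (by name: the statement is the Claim_ definition above) =====
theorem minimum_element_in_sorted_array_spec : Claim_equal_minimum_element_in_sorted_array := by
  intro arr _ hpre
  have h2 : 1 < arr.length := hpre
  unfold Spec_minimum_element_in_sorted_array
  simp only [minimum_element_in_sorted_array, minimum_element_in_sorted_array_alt]
  rw [pvBubble_eq_sort, pvAltFold_eq]
  simp [PySem.List.pyGet?, PySem.List.pyIdx?, h2]
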